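-- pv_equiv track=rewrite | github.com/subramani-tejas/python-algorithms | my_sclr/day_6_arrays/count_elements.py | solve
-- ===== SOURCE A (Python) =====
-- def solve(arr):
--     max_ = arr[0]
--     for item in arr:
--         if item > max_:
--             max_ = item
--
--     count = 0
--     for item in arr:
--         if item != max_:
--             count = count + 1
--     return count
-- ===== SOURCE B (Python) =====
-- def solve(arr):
--     max_ = arr[0]
--     freq = 0
--     for item in arr:
--         if item > max_:
--             max_ = item
--             freq = 1
--         elif item == max_:
--             freq = freq + 1
--     return len(arr) - freq
-- ===== Notes on version B (the rewrite author's own statement) =====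
-- stated objective: alternative
-- what changed: Single pass maintaining the running maximum together with its occurrence count, returning len(arr) - freq, instead of two separate scans (one for the max, one counting inequalities).
import Mathlib
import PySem

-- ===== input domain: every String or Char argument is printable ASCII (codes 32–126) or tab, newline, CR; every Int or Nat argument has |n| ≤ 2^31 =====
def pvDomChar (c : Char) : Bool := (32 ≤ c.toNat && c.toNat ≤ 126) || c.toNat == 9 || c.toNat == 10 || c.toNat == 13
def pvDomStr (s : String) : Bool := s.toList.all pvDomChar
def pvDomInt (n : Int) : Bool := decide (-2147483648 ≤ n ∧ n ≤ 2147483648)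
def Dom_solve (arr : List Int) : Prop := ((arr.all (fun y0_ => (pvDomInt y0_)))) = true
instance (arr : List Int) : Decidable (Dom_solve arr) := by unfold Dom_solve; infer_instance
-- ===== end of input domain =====

-- B merges the max scan and the counting scan into one pass that tracks the maximum
-- together with its occurrence count and returns len(arr) - freq (objective: alternative decomposition).

-- ===== PORT A =====
def solve (arr : List Int) : Int :=
  match PySem.List.pyGet? arr 0 with
  | none => 0  -- arr[0] raises IndexError on []; excluded by Pre_solve
  | some a0 =>
    let max_ := arr.foldl (fun m item => if item > m then item else m) a0
    arr.foldl (fun c item => if item ≠ max_ then c + 1 else c) (0 : Int)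

-- ===== PORT B =====
def solve_alt (arr : List Int) : Int :=
  match PySem.List.pyGet? arr 0 with
  | none => 0  -- arr[0] raises IndexError on []; excluded by Pre_solve
  | some a0 =>
    let s := arr.foldl
      (fun (s : Int × Int) item =>
        if item > s.1 then (item, 1)
        else if item = s.1 then (s.1, s.2 + 1)
        else s) (a0, (0 : Int))
    (arr.length : Int) - s.2

-- ===== PRECONDITION & SPEC =====
-- Pre_ excludes only the empty list, on which A raises IndexError (arr[0]).
def Pre_solve (arr : List Int) : Prop := arr ≠ []
instance (arr : List Int) : Decidable (Pre_solve arr) := by unfold Pre_solve; infer_instance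

def pvWitness_solve : List Int := ([3, 1, 3, 2] : List Int)

def Spec_solve (arr : List Int) (out : Int) : Prop := out = solve_alt arr
instance (arr : List Int) (out : Int) : Decidable (Spec_solve arr out) := by unfold Spec_solve; infer_instance

-- ===== CLAIM (what is proved, stated in full; the proofs are below) =====
def Claim_equal_solve : Prop := ∀ (arr : List Int), Dom_solve arr → Pre_solve arr → Spec_solve arr (solve arr)

-- ===== LEMMAS AND PROOFS =====

-- the running maximum never decreases
theorem maxfold_ge (l : List Int) (m : Int) :
    m ≤ l.foldl (fun m item => if item > m then item else m) m := by
  induction l generalizing m with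
  | nil => exact le_refl m
  | cons i t ih =>
    simp only [List.foldl_cons]
    by_cases h : i > m
    · rw [if_pos h]; exact le_trans (le_of_lt h) (ih i)
    · rw [if_neg h]; exact ih m

theorem count_cons_int (M i : Int) (t : List Int) :
    (List.count M (i :: t) : Int) = (if M = i then 1 else 0) + (t.count M : Int) := by
  by_cases h : M = i
  · subst h; simp; ring
  · simp [h, Ne.symm h]

-- B's fold computes the max together with the count of its occurrences
theorem bfold_eq (l : List Int) (m f : Int) :
    l.foldl
      (fun (s : Int × Int) item =>
        if item > s.1 then (item, 1)
        else if item = s.1 then (s.1, s.2 + 1)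
        else s) (m, f)
    = (l.foldl (fun m item => if item > m then item else m) m,
       (if l.foldl (fun m item => if item > m then item else m) m = m then f else 0)
         + (l.count (l.foldl (fun m item => if item > m then item else m) m) : Int)) := by
  induction l generalizing m f with
  | nil => simp
  | cons i t ih =>
    simp only [List.foldl_cons]
    by_cases h : i > m
    · simp only [if_pos h]
      rw [ih i 1, count_cons_int]
      have hMi : i ≤ t.foldl (fun m item => if item > m then item else m) i := maxfold_ge t i
      have hMm : t.foldl (fun m item => if item > m then item else m) i ≠ m := by omega
      simp only [if_neg hMm]
      by_cases hMi' : t.foldl (fun m item => if item > m then item else m) i = i <;>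
        simp [hMi']
    · simp only [if_neg h]
      by_cases he : i = m
      · rw [he, if_pos rfl, ih m (f + 1), count_cons_int]
        by_cases hMi' : t.foldl (fun m item => if item > m then item else m) m = m <;>
          simp [hMi'] <;> ring
      · rw [if_neg he, ih m f, count_cons_int]
        have hMm : m ≤ t.foldl (fun m item => if item > m then item else m) m := maxfold_ge t m
        have hMi : t.foldl (fun m item => if item > m then item else m) m ≠ i := by omega
        simp [hMi]

-- A's counting loop counts elements different from M
theorem cfold_eq (l : List Int) (M c : Int) :
    l.foldl (fun c item => if item ≠ M then c + 1 else c) c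
      = c + (l.countP (fun item => item ≠ M) : Int) := by
  induction l generalizing c with
  | nil => simp
  | cons i t ih =>
    simp only [List.foldl_cons]
    by_cases h : i ≠ M
    · rw [if_pos h, ih]
      simp [List.countP_cons, h]
      ring
    · rw [if_neg h, ih]
      simp [List.countP_cons, h]

theorem countP_ne_add_count (l : List Int) (M : Int) :
    l.countP (fun item => item ≠ M) + l.count M = l.length := by
  induction l with
  | nil => simp
  | cons i t ih =>
    rw [List.countP_cons, List.count_cons, List.length_cons]
    simp only [ne_eq, decide_not] at ih ⊢
    by_cases h : i = M <;> simp [h] <;> omega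

-- ===== VERDICT (by name: the statement is the Claim_ definition above) =====
theorem solve_spec : Claim_equal_solve := by
  intro arr _ hpre
  unfold Spec_solve solve solve_alt
  cases arr with
  | nil => exact absurd rfl hpre
  | cons a t =>
    rw [PySem.List.pyGet?_zero_cons]
    simp only
    rw [bfold_eq (a :: t) a 0,
        cfold_eq (a :: t) ((a :: t).foldl (fun m item => if item > m then item else m) a) 0]
    have h1 := countP_ne_add_count (a :: t) ((a :: t).foldl (fun m item => if item > m then item else m) a)
    have h2 : ((a :: t).countP
          (fun item => item ≠ (a :: t).foldl (fun m item => if item > m then item else m) a) : Int)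
        = ((a :: t).length : Int)
          - ((a :: t).count ((a :: t).foldl (fun m item => if item > m then item else m) a) : Int) := by
      omega
    rw [h2]
    split <;> [ring; ring]
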